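-- pv_equiv track=rewrite | github.com/JakobTimmermann/coding_challenges | project_euler/p50-consecutive_prime_sum/main.py | determine_largest_possible_window
-- ===== SOURCE A (Python) =====
-- def determine_largest_possible_window(primes):
--     sum_all_primes = 0
--     idx = 0
--     while sum_all_primes < primes[-1]:
--         prime = primes[idx]
--         sum_all_primes += prime
--         idx += 1
--     return idx
-- ===== SOURCE B (Python) =====
-- def determine_largest_possible_window(primes):
--     target = primes[-1]
--     if target <= 0:
--         return 0
--     prefix = []
--     s = 0
--     for p in primes:
--         s += p
--         prefix.append(s)
--     for i, s in enumerate(prefix, 1):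
--         if s >= target:
--             return i
-- ===== Notes on version B (the rewrite author's own statement) =====
-- stated objective: alternative
-- what changed: B reads the target once, returns 0 immediately for a non-positive target, then builds the full prefix-sum table in one pass and searches it for the first entry reaching the target, instead of A's while-loop that accumulates and indexes the list while testing the running sum.
import Mathlib
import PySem

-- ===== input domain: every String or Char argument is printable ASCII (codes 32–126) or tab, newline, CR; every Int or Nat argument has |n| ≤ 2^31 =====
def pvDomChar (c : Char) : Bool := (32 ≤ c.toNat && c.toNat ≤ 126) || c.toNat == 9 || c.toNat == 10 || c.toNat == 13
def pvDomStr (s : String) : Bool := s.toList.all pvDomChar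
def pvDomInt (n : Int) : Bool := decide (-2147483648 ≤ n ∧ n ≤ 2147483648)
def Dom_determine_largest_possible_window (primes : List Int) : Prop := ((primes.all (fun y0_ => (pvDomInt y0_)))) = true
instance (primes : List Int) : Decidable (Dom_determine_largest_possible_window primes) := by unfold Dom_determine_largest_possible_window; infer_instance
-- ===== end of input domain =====

-- B builds the prefix-sum table once and searches it for the first entry reaching the last
-- element, instead of A's while-loop accumulating while indexing (alternative decomposition).


-- ===== PORT A =====
-- the while loop of A: state (sum_all_primes, idx); fuel primes.length + 1 suffices because
-- idx grows by 1 each step and the loop raises IndexError (→ default 0, outside Pre_) at idx = length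
def pvGoA (primes : List Int) (last : Int) : Nat → Int → Int → Int
  | 0, _, idx => idx
  | fuel + 1, s, idx =>
    if s < last then
      match PySem.List.pyGet? primes idx with
      | none => 0            -- IndexError in Python; excluded by Pre_
      | some p => pvGoA primes last fuel (s + p) (idx + 1)
    else idx

def determine_largest_possible_window (primes : List Int) : Int :=
  match PySem.List.pyGet? primes (-1) with
  | none => 0                -- IndexError on empty list; excluded by Pre_
  | some last => pvGoA primes last (primes.length + 1) 0 0

-- ===== PORT B =====
-- the first for-loop of B: running sum s, appending each new prefix sum
def pvPrefix (s : Int) : List Int → List Int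
  | [] => []
  | p :: rest => (s + p) :: pvPrefix (s + p) rest

-- B: read target, return 0 for non-positive target, build prefix table, scan for first entry ≥ target
def determine_largest_possible_window_alt (primes : List Int) : Int :=
  match PySem.List.pyGet? primes (-1) with
  | none => 0                -- IndexError on empty list; excluded by Pre_
  | some target =>
    if target ≤ 0 then 0
    else
      match (pvPrefix 0 primes).findIdx? (fun x => decide (target ≤ x)) with
      | some i => (i : Int) + 1
      | none => 0            -- falls off the loop (no return) in Python; excluded by Pre_

-- ===== PRECONDITION & SPEC =====
-- Pre_ excludes exactly the inputs where Python A raises: the empty list (reading the last element raises IndexError)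
-- and lists where no prefix sum ever reaches the last element (idx runs past the end).
-- The equality proof below holds for the ports on all inputs (both default to 0 where Python raises).
def Pre_determine_largest_possible_window (primes : List Int) : Prop :=
  primes ≠ [] ∧ ∃ k ∈ List.range (primes.length + 1), primes.getLastD 0 ≤ (primes.take k).sum
instance (primes : List Int) : Decidable (Pre_determine_largest_possible_window primes) := by unfold Pre_determine_largest_possible_window; infer_instance

def pvWitness_determine_largest_possible_window : List Int := [2, 3, 5, 7]

def Spec_determine_largest_possible_window (primes : List Int) (out : Int) : Prop := out = determine_largest_possible_window_alt primes
instance (primes : List Int) (out : Int) : Decidable (Spec_determine_largest_possible_window primes out) := by unfold Spec_determine_largest_possible_window; infer_instance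

-- ===== CLAIM (what is proved, stated in full; the proofs are below) =====
def Claim_equal_determine_largest_possible_window : Prop := ∀ (primes : List Int), Dom_determine_largest_possible_window primes → Pre_determine_largest_possible_window primes → Spec_determine_largest_possible_window primes (determine_largest_possible_window primes)

-- ===== LEMMAS AND PROOFS =====

-- the loop of A, started at index i with running sum s < target and suffix l left to scan,
-- returns exactly what B's search over the prefix table of the suffix reports
theorem pvGoA_eq_prefix (target : Int) :
    ∀ (l primes : List Int) (i : Nat) (s : Int),
      primes.drop i = l → s < target →
      pvGoA primes target (l.length + 1) s i =
        (match (pvPrefix s l).findIdx? (fun x => decide (target ≤ x)) with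
         | some j => (i : Int) + (j : Int) + 1
         | none => 0) := by
  intro l
  induction l with
  | nil =>
    intro primes i s hdrop hlt
    have hget : PySem.List.pyGet? primes (i : Int) = none := by
      simp [PySem.List.pyGet?, PySem.List.pyIdx?]
      have := congrArg List.length hdrop
      simp at this
      omega
    simp [pvGoA, hlt, hget, pvPrefix]
  | cons p rest ih =>
    intro primes i s hdrop hlt
    have hget : PySem.List.pyGet? primes (i : Int) = some p := by
      have h1 : primes[i]? = some p := by
        rw [← List.head?_drop, hdrop]; rfl
      obtain ⟨hil, hv⟩ := List.getElem?_eq_some_iff.mp h1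
      simp [PySem.List.pyGet?, PySem.List.pyIdx?, hil, hv]
    by_cases hc : s + p < target
    · have hdrop' : primes.drop (i + 1) = rest := by
        have : primes.drop (i + 1) = (primes.drop i).tail := by
          rw [List.tail_drop]
        rw [this, hdrop]; rfl
      have := ih primes (i + 1) (s + p) hdrop' hc
      have hlen : rest.length + 1 + 1 = (p :: rest).length + 1 := by simp
      rw [← hlen]
      show pvGoA primes target (rest.length + 1 + 1) s i = _
      rw [show pvGoA primes target (rest.length + 1 + 1) s i
            = pvGoA primes target (rest.length + 1) (s + p) ((i : Int) + 1) by
            simp [pvGoA, hlt, hget]]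
      have hcast : ((i : Int) + 1) = ((i + 1 : Nat) : Int) := by push_cast; ring
      rw [hcast, this]
      have hhead : pvPrefix s (p :: rest) = (s + p) :: pvPrefix (s + p) rest := rfl
      rw [hhead]
      rw [List.findIdx?_cons]
      simp only [decide_eq_true_eq]
      have : ¬ target ≤ s + p := by omega
      simp only [this, if_false]
      cases hfi : (pvPrefix (s + p) rest).findIdx? (fun x => decide (target ≤ x)) with
      | none => simp
      | some j => simp only [Option.map_some]; push_cast; ring
    · have hle : target ≤ s + p := by omega
      show pvGoA primes target (rest.length + 1 + 1) s i = _
      rw [show pvGoA primes target (rest.length + 1 + 1) s i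
            = pvGoA primes target (rest.length + 1) (s + p) ((i : Int) + 1) by
            simp [pvGoA, hlt, hget]]
      have hstop : pvGoA primes target (rest.length + 1) (s + p) ((i : Int) + 1)
          = (i : Int) + 1 := by
        cases rest with
        | nil => simp [pvGoA, show ¬ s + p < target by omega]
        | cons q t => simp [pvGoA, show ¬ s + p < target by omega]
      rw [hstop]
      have hhead : pvPrefix s (p :: rest) = (s + p) :: pvPrefix (s + p) rest := rfl
      rw [hhead, List.findIdx?_cons]
      simp [hle]

-- the two ports agree on every input (A's port returns the same default 0 where Python A raises)
theorem ports_eq (primes : List Int) :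
    determine_largest_possible_window primes = determine_largest_possible_window_alt primes := by
  unfold determine_largest_possible_window determine_largest_possible_window_alt
  cases h : PySem.List.pyGet? primes (-1) with
  | none => rfl
  | some target =>
    dsimp only
    by_cases ht : target ≤ 0
    · have : ¬ (0 : Int) < target := by omega
      cases primes with
      | nil => simp [pvGoA, this, ht]
      | cons p rest => simp [pvGoA, this, ht]
    · have hlt : (0 : Int) < target := by omega
      have := pvGoA_eq_prefix target primes primes 0 0 (by simp) hlt
      simp only [Nat.cast_zero] at this
      rw [this]
      simp only [if_neg ht]
      cases hfi : (pvPrefix 0 primes).findIdx? (fun x => decide (target ≤ x)) with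
      | none => simp
      | some j => simp

-- ===== VERDICT (by name: the statement is the Claim_ definition above) =====
theorem determine_largest_possible_window_spec : Claim_equal_determine_largest_possible_window := by
  intro primes _ _
  unfold Spec_determine_largest_possible_window
  exact ports_eq primes
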